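-- pv_equiv track=rewrite | github.com/pirl-unc/nexus | scripts/generate_docs.py | _placeholder_for_param
-- ===== SOURCE A (Python) =====
-- def _placeholder_for_param(name):
--     """Return a sensible placeholder based on the parameter name."""
--     file_extensions = [
--         ('_fasta_file', '/path/to/file.fasta'),
--         ('_fa_file', '/path/to/file.fa'),
--         ('_fastq_file', '/path/to/file.fastq'),
--         ('_gtf_file', '/path/to/file.gtf'),
--         ('_gff_file', '/path/to/file.gff'),
--         ('_bed_file', '/path/to/file.bed'),
--         ('_bam_file', '/path/to/file.bam'),
--         ('_bai_file', '/path/to/file.bai'),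
--         ('_vcf_file', '/path/to/file.vcf'),
--         ('_tsv_file', '/path/to/file.tsv'),
--         ('_csv_file', '/path/to/file.csv'),
--         ('_txt_file', '/path/to/file.txt'),
--         ('_json_file', '/path/to/file.json'),
--         ('_yaml_file', '/path/to/file.yaml'),
--         ('_xml_file', '/path/to/file.xml'),
--         ('_sif_file', '/path/to/file.sif'),
--         ('_file', '/path/to/file'),
--         ('_dir', '/path/to/dir/'),
--         ('_path', '/path/to/dir/'),
--     ]
--     for suffix, placeholder in file_extensions:
--         if name.endswith(suffix):
--             return placeholder
--     return '""'
-- ===== SOURCE B (Python) =====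
-- _KNOWN_EXTS = frozenset((
--     'fasta', 'fa', 'fastq', 'gtf', 'gff', 'bed', 'bam', 'bai',
--     'vcf', 'tsv', 'csv', 'txt', 'json', 'yaml', 'xml', 'sif'))
--
--
-- def _placeholder_for_param(name):
--     """Return a sensible placeholder based on the parameter name."""
--     if name.endswith('_dir') or name.endswith('_path'):
--         return '/path/to/dir/'
--     if not name.endswith('_file'):
--         return '""'
--     _head, sep, ext = name[:-5].rpartition('_')
--     if sep and ext in _KNOWN_EXTS:
--         return '/path/to/file.' + ext
--     return '/path/to/file'
-- ===== Notes on version B (the rewrite author's own statement) =====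
-- stated objective: alternative
-- what changed: A scans a 19-entry table of (suffix, full placeholder path) pairs with endswith; B keeps no path table at all: it checks the _dir/_path/_file fallbacks directly, splits the '_file' stem with rpartition('_'), and derives the placeholder as '/path/to/file.' + ext when ext is one of the 16 known extensions.
import Mathlib
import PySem

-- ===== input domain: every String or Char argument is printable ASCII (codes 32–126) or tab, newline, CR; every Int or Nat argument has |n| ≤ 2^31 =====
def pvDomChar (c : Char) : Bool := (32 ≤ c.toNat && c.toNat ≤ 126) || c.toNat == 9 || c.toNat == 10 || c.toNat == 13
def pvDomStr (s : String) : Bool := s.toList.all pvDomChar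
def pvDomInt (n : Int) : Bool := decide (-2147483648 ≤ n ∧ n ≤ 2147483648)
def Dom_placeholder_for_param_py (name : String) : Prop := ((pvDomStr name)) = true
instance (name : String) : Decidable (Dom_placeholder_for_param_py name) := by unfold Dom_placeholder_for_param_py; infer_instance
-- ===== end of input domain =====

-- B replaces A's chain of 19 endswith tests against a table of full paths by direct fallback
-- checks plus rpartition of the '_file' stem: the placeholder is DERIVED as
-- '/path/to/file.' + ext when ext is one of the 16 known extensions (objective: alternative).

-- ===== PORT A =====
def pvFileExtensions : List (String × String) :=
  [("_fasta_file", "/path/to/file.fasta"),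
   ("_fa_file", "/path/to/file.fa"),
   ("_fastq_file", "/path/to/file.fastq"),
   ("_gtf_file", "/path/to/file.gtf"),
   ("_gff_file", "/path/to/file.gff"),
   ("_bed_file", "/path/to/file.bed"),
   ("_bam_file", "/path/to/file.bam"),
   ("_bai_file", "/path/to/file.bai"),
   ("_vcf_file", "/path/to/file.vcf"),
   ("_tsv_file", "/path/to/file.tsv"),
   ("_csv_file", "/path/to/file.csv"),
   ("_txt_file", "/path/to/file.txt"),
   ("_json_file", "/path/to/file.json"),
   ("_yaml_file", "/path/to/file.yaml"),
   ("_xml_file", "/path/to/file.xml"),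
   ("_sif_file", "/path/to/file.sif"),
   ("_file", "/path/to/file"),
   ("_dir", "/path/to/dir/"),
   ("_path", "/path/to/dir/")]

-- the 'for suffix, placeholder in file_extensions' loop with its early return
def pvLoopA (name : String) : List (String × String) → String
  | [] => "\"\""
  | (suffix, placeholder) :: rest =>
      if PySem.Str.endswith name suffix then placeholder else pvLoopA name rest

def placeholder_for_param_py (name : String) : String := pvLoopA name pvFileExtensions

-- ===== PORT B =====
def pvKnownExts : List String :=
  ["fasta", "fa", "fastq", "gtf", "gff", "bed", "bam", "bai",
   "vcf", "tsv", "csv", "txt", "json", "yaml", "xml", "sif"]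

-- Source B's stem.rpartition('_') (head unused): the separator-found flag and the part after the last '_'
def pvRPartUnderscore (stem : String) : Bool × String :=
  (stem.toList.contains '_',
   String.ofList (stem.toList.reverse.takeWhile (· ≠ '_')).reverse)

def placeholder_for_param_py_alt (name : String) : String :=
  if PySem.Str.endswith name "_dir" || PySem.Str.endswith name "_path" then "/path/to/dir/"
  else if !(PySem.Str.endswith name "_file") then "\"\""
  else
    let p := pvRPartUnderscore (PySem.Str.slice name none (some (-5)))
    if p.1 && pvKnownExts.contains p.2 then "/path/to/file." ++ p.2
    else "/path/to/file"

-- ===== PRECONDITION & SPEC =====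
def Spec_placeholder_for_param_py (name : String) (out : String) : Prop := out = placeholder_for_param_py_alt name
instance (name : String) (out : String) : Decidable (Spec_placeholder_for_param_py name out) := by unfold Spec_placeholder_for_param_py; infer_instance

-- ===== CLAIM (what is proved, stated in full; the proofs are below) =====
def Claim_equal_placeholder_for_param_py : Prop := ∀ (name : String), Dom_placeholder_for_param_py name → Spec_placeholder_for_param_py name (placeholder_for_param_py name)

-- ===== LEMMAS AND PROOFS =====

-- endswith as a prefix of the reversed character list
lemma pv_ew_iff (s p : String) :
    PySem.Str.endswith s p = true ↔ p.toList.reverse <+: s.toList.reverse := by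
  simp only [List.reverse_prefix]
  simp [PySem.Chars.endswith_iff]

-- a prefix 'tok ++ ['_']' of T (with '_' ∉ tok) is exactly T's maximal '_'-free prefix plus the first '_'
lemma pv_prefix_takeWhile (tok : List Char) : ∀ T : List Char, '_' ∉ tok →
    ((tok ++ ['_']) <+: T ↔ (T.takeWhile (· ≠ '_') = tok ∧ '_' ∈ T)) := by
  induction tok with
  | nil =>
    intro T _
    cases T with
    | nil => simp
    | cons c T' =>
      by_cases hc : c = '_'
      · subst hc; simp
      · simp [List.cons_prefix_cons, hc, Ne.symm hc]
  | cons a tok' ih =>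
    intro T h
    simp only [List.mem_cons, not_or] at h
    have ha : a ≠ '_' := Ne.symm h.1
    have h' : '_' ∉ tok' := h.2
    cases T with
    | nil => simp
    | cons c T' =>
      by_cases hc : c = a
      · subst hc
        simp only [List.cons_append, List.cons_prefix_cons, true_and,
          List.takeWhile_cons, ha, decide_not]
        rw [ih T' h']
        simp [List.mem_cons, Ne.symm ha]
      · by_cases hu : c = '_'
        · subst hu
          simp [List.cons_prefix_cons, Ne.symm hc]
        · simp [List.cons_prefix_cons, Ne.symm hc, hu, hc]

-- any suffix of the shape '_<ext>_file' tested by A, characterised through the rpartition token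
lemma pv_ew_ext_eq (name suf ext : String) (T : List Char)
    (hT : name.toList.reverse = 'e'::'l'::'i'::'f'::'_'::T)
    (hsuf : suf.toList.reverse = 'e'::'l'::'i'::'f'::'_'::(ext.toList.reverse ++ ['_']))
    (hx : '_' ∉ ext.toList) (hm : '_' ∈ T) :
    PySem.Str.endswith name suf =
      decide (ext = String.ofList ((T.takeWhile (· ≠ '_')).reverse)) := by
  have hx' : '_' ∉ ext.toList.reverse := by simpa using hx
  rw [Bool.eq_iff_iff, pv_ew_iff, hT, hsuf]
  simp only [List.cons_prefix_cons, true_and, decide_eq_true_eq]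
  rw [pv_prefix_takeWhile ext.toList.reverse T hx']
  have key : (T.takeWhile (· ≠ '_') = ext.toList.reverse) ↔
      ext = String.ofList ((T.takeWhile (· ≠ '_')).reverse) := by
    rw [← String.toList_inj, String.toList_ofList]
    constructor
    · intro h1; rw [h1, List.reverse_reverse]
    · intro h1; rw [h1, List.reverse_reverse]
  rw [key]
  simp [hm]

-- a '…_file' suffix test fails when the stem has no '_' at all
lemma pv_ew_ext_false (name suf ext : String) (T : List Char)
    (hT : name.toList.reverse = 'e'::'l'::'i'::'f'::'_'::T)
    (hsuf : suf.toList.reverse = 'e'::'l'::'i'::'f'::'_'::(ext.toList.reverse ++ ['_']))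
    (hm : '_' ∉ T) :
    PySem.Str.endswith name suf = false := by
  cases hc : PySem.Str.endswith name suf with
  | false => rfl
  | true =>
    exfalso
    have h := (pv_ew_iff name suf).mp hc
    rw [hT, hsuf] at h
    simp only [List.cons_prefix_cons, true_and] at h
    exact hm (h.subset (by simp))

-- a '…_file' suffix test fails when name does not end in '_file'
lemma pv_ew_file_false (name suf : String)
    (hf : PySem.Str.endswith name "_file" = false)
    (h5 : ('e'::'l'::'i'::'f'::'_'::[]) <+: suf.toList.reverse) :
    PySem.Str.endswith name suf = false := by
  cases hc : PySem.Str.endswith name suf with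
  | false => rfl
  | true =>
    exfalso
    have h := (pv_ew_iff name suf).mp hc
    have h2 : ('e'::'l'::'i'::'f'::'_'::[]) <+: name.toList.reverse := h5.trans h
    have h3 : PySem.Str.endswith name "_file" = true := by
      rw [pv_ew_iff]
      exact h2
    rw [hf] at h3
    exact absurd h3 (by simp)

-- '_dir' / '_path' cannot be suffixes of a name ending in '_file'
lemma pv_ew_dir_false (name : String) (T : List Char)
    (hT : name.toList.reverse = 'e'::'l'::'i'::'f'::'_'::T) :
    PySem.Str.endswith name "_dir" = false := by
  cases hc : PySem.Str.endswith name "_dir" with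
  | false => rfl
  | true =>
    exfalso
    have h := (pv_ew_iff name "_dir").mp hc
    rw [hT, show ("_dir" : String).toList.reverse = ['r','i','d','_'] from by decide] at h
    obtain ⟨t, ht⟩ := h
    simp at ht

lemma pv_ew_path_false (name : String) (T : List Char)
    (hT : name.toList.reverse = 'e'::'l'::'i'::'f'::'_'::T) :
    PySem.Str.endswith name "_path" = false := by
  cases hc : PySem.Str.endswith name "_path" with
  | false => rfl
  | true =>
    exfalso
    have h := (pv_ew_iff name "_path").mp hc
    rw [hT, show ("_path" : String).toList.reverse = ['h','t','a','p','_'] from by decide] at h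
    obtain ⟨t, ht⟩ := h
    simp at ht

-- A's residual 16-way decision chain equals B's membership test + derived path
set_option maxHeartbeats 1000000 in
lemma pv_list_chain (k : String) :
    (if "fasta" = k then "/path/to/file.fasta"
     else if "fa" = k then "/path/to/file.fa"
     else if "fastq" = k then "/path/to/file.fastq"
     else if "gtf" = k then "/path/to/file.gtf"
     else if "gff" = k then "/path/to/file.gff"
     else if "bed" = k then "/path/to/file.bed"
     else if "bam" = k then "/path/to/file.bam"
     else if "bai" = k then "/path/to/file.bai"
     else if "vcf" = k then "/path/to/file.vcf"
     else if "tsv" = k then "/path/to/file.tsv"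
     else if "csv" = k then "/path/to/file.csv"
     else if "txt" = k then "/path/to/file.txt"
     else if "json" = k then "/path/to/file.json"
     else if "yaml" = k then "/path/to/file.yaml"
     else if "xml" = k then "/path/to/file.xml"
     else if "sif" = k then "/path/to/file.sif"
     else "/path/to/file") =
    (if pvKnownExts.contains k then "/path/to/file." ++ k else "/path/to/file") := by
  by_cases h1 : "fasta" = k
  · subst h1; decide
  rw [if_neg h1]
  by_cases h2 : "fa" = k
  · subst h2; decide
  rw [if_neg h2]
  by_cases h3 : "fastq" = k
  · subst h3; decide
  rw [if_neg h3]
  by_cases h4 : "gtf" = k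
  · subst h4; decide
  rw [if_neg h4]
  by_cases h5 : "gff" = k
  · subst h5; decide
  rw [if_neg h5]
  by_cases h6 : "bed" = k
  · subst h6; decide
  rw [if_neg h6]
  by_cases h7 : "bam" = k
  · subst h7; decide
  rw [if_neg h7]
  by_cases h8 : "bai" = k
  · subst h8; decide
  rw [if_neg h8]
  by_cases h9 : "vcf" = k
  · subst h9; decide
  rw [if_neg h9]
  by_cases h10 : "tsv" = k
  · subst h10; decide
  rw [if_neg h10]
  by_cases h11 : "csv" = k
  · subst h11; decide
  rw [if_neg h11]
  by_cases h12 : "txt" = k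
  · subst h12; decide
  rw [if_neg h12]
  by_cases h13 : "json" = k
  · subst h13; decide
  rw [if_neg h13]
  by_cases h14 : "yaml" = k
  · subst h14; decide
  rw [if_neg h14]
  by_cases h15 : "xml" = k
  · subst h15; decide
  rw [if_neg h15]
  by_cases h16 : "sif" = k
  · subst h16; decide
  rw [if_neg h16]
  have hk : pvKnownExts.contains k = false := by
    simp only [pvKnownExts, List.contains_cons, List.contains_nil, Bool.or_eq_false_iff,
      beq_eq_false_iff_ne, ne_eq]
    exact ⟨fun h => h1 h.symm, fun h => h2 h.symm, fun h => h3 h.symm, fun h => h4 h.symm,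
      fun h => h5 h.symm, fun h => h6 h.symm, fun h => h7 h.symm, fun h => h8 h.symm,
      fun h => h9 h.symm, fun h => h10 h.symm, fun h => h11 h.symm, fun h => h12 h.symm,
      fun h => h13 h.symm, fun h => h14 h.symm, fun h => h15 h.symm, fun h => h16 h.symm, trivial⟩
  rw [hk]
  simp

-- name[:-5] reversed is exactly T when name reversed is 'elif_' ++ T
lemma pv_stem_eq (name : String) (T : List Char)
    (hT : name.toList.reverse = 'e'::'l'::'i'::'f'::'_'::T) :
    (PySem.Str.slice name none (some (-5))).toList.reverse = T := by
  have hL : name.toList = T.reverse ++ ['_', 'f', 'i', 'l', 'e'] := by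
    have := congrArg List.reverse hT
    simpa using this
  have hslice : (PySem.Str.slice name none (some (-5))).toList
      = name.toList.take (name.toList.length - 5) := by
    simp [PySem.Str.toList_slice, PySem.List.slice_to_neg_ofNat _ 5 (by omega)]
  rw [hslice, hL]
  have hlen : (T.reverse ++ ['_', 'f', 'i', 'l', 'e']).length - 5 = T.reverse.length := by
    simp
  rw [hlen, List.take_left]
  simp

-- ===== VERDICT (by name: the statement is the Claim_ definition above) =====
theorem placeholder_for_param_py_spec : Claim_equal_placeholder_for_param_py := by
  intro name _
  show placeholder_for_param_py name = placeholder_for_param_py_alt name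
  simp only [placeholder_for_param_py, pvFileExtensions, pvLoopA, placeholder_for_param_py_alt]
  cases hf : PySem.Str.endswith name "_file" with
  | false =>
    have c1 := pv_ew_file_false name "_fasta_file" hf (by decide)
    have c2 := pv_ew_file_false name "_fa_file" hf (by decide)
    have c3 := pv_ew_file_false name "_fastq_file" hf (by decide)
    have c4 := pv_ew_file_false name "_gtf_file" hf (by decide)
    have c5 := pv_ew_file_false name "_gff_file" hf (by decide)
    have c6 := pv_ew_file_false name "_bed_file" hf (by decide)
    have c7 := pv_ew_file_false name "_bam_file" hf (by decide)
    have c8 := pv_ew_file_false name "_bai_file" hf (by decide)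
    have c9 := pv_ew_file_false name "_vcf_file" hf (by decide)
    have c10 := pv_ew_file_false name "_tsv_file" hf (by decide)
    have c11 := pv_ew_file_false name "_csv_file" hf (by decide)
    have c12 := pv_ew_file_false name "_txt_file" hf (by decide)
    have c13 := pv_ew_file_false name "_json_file" hf (by decide)
    have c14 := pv_ew_file_false name "_yaml_file" hf (by decide)
    have c15 := pv_ew_file_false name "_xml_file" hf (by decide)
    have c16 := pv_ew_file_false name "_sif_file" hf (by decide)
    rw [c1, c2, c3, c4, c5, c6, c7, c8, c9, c10, c11, c12, c13, c14, c15, c16]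
    cases hd : PySem.Str.endswith name "_dir" with
    | true => simp
    | false =>
      cases hp : PySem.Str.endswith name "_path" with
      | true => simp
      | false => simp
  | true =>
    have hpre : ('e'::'l'::'i'::'f'::'_'::[]) <+: name.toList.reverse := by
      have h := (pv_ew_iff name "_file").mp hf
      rw [show ("_file" : String).toList.reverse = ['e','l','i','f','_'] from by decide] at h
      exact h
    obtain ⟨T, hT0⟩ := hpre
    have hT : name.toList.reverse = 'e'::'l'::'i'::'f'::'_'::T := by rw [← hT0]; rfl
    have hd := pv_ew_dir_false name T hT
    have hp := pv_ew_path_false name T hT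
    have hstem := pv_stem_eq name T hT
    have hstem2 : (PySem.Str.slice name none (some (-5))).toList = T.reverse := by
      rw [← hstem, List.reverse_reverse]
    rw [hd, hp]
    by_cases hm : '_' ∈ T
    · have c1 := pv_ew_ext_eq name "_fasta_file" "fasta" T hT (by decide) (by decide) hm
      have c2 := pv_ew_ext_eq name "_fa_file" "fa" T hT (by decide) (by decide) hm
      have c3 := pv_ew_ext_eq name "_fastq_file" "fastq" T hT (by decide) (by decide) hm
      have c4 := pv_ew_ext_eq name "_gtf_file" "gtf" T hT (by decide) (by decide) hm
      have c5 := pv_ew_ext_eq name "_gff_file" "gff" T hT (by decide) (by decide) hm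
      have c6 := pv_ew_ext_eq name "_bed_file" "bed" T hT (by decide) (by decide) hm
      have c7 := pv_ew_ext_eq name "_bam_file" "bam" T hT (by decide) (by decide) hm
      have c8 := pv_ew_ext_eq name "_bai_file" "bai" T hT (by decide) (by decide) hm
      have c9 := pv_ew_ext_eq name "_vcf_file" "vcf" T hT (by decide) (by decide) hm
      have c10 := pv_ew_ext_eq name "_tsv_file" "tsv" T hT (by decide) (by decide) hm
      have c11 := pv_ew_ext_eq name "_csv_file" "csv" T hT (by decide) (by decide) hm
      have c12 := pv_ew_ext_eq name "_txt_file" "txt" T hT (by decide) (by decide) hm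
      have c13 := pv_ew_ext_eq name "_json_file" "json" T hT (by decide) (by decide) hm
      have c14 := pv_ew_ext_eq name "_yaml_file" "yaml" T hT (by decide) (by decide) hm
      have c15 := pv_ew_ext_eq name "_xml_file" "xml" T hT (by decide) (by decide) hm
      have c16 := pv_ew_ext_eq name "_sif_file" "sif" T hT (by decide) (by decide) hm
      have hcont : (PySem.Str.slice name none (some (-5))).toList.contains '_' = true := by
        rw [hstem2]
        simp [hm]
      rw [c1, c2, c3, c4, c5, c6, c7, c8, c9, c10, c11, c12, c13, c14, c15, c16]
      simp only [pvRPartUnderscore, hcont, hstem, Bool.true_and, decide_eq_true_eq,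
        if_true, Bool.or_self, Bool.not_true]
      rw [pv_list_chain]
      simp
    · have c1 := pv_ew_ext_false name "_fasta_file" "fasta" T hT (by decide) hm
      have c2 := pv_ew_ext_false name "_fa_file" "fa" T hT (by decide) hm
      have c3 := pv_ew_ext_false name "_fastq_file" "fastq" T hT (by decide) hm
      have c4 := pv_ew_ext_false name "_gtf_file" "gtf" T hT (by decide) hm
      have c5 := pv_ew_ext_false name "_gff_file" "gff" T hT (by decide) hm
      have c6 := pv_ew_ext_false name "_bed_file" "bed" T hT (by decide) hm
      have c7 := pv_ew_ext_false name "_bam_file" "bam" T hT (by decide) hm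
      have c8 := pv_ew_ext_false name "_bai_file" "bai" T hT (by decide) hm
      have c9 := pv_ew_ext_false name "_vcf_file" "vcf" T hT (by decide) hm
      have c10 := pv_ew_ext_false name "_tsv_file" "tsv" T hT (by decide) hm
      have c11 := pv_ew_ext_false name "_csv_file" "csv" T hT (by decide) hm
      have c12 := pv_ew_ext_false name "_txt_file" "txt" T hT (by decide) hm
      have c13 := pv_ew_ext_false name "_json_file" "json" T hT (by decide) hm
      have c14 := pv_ew_ext_false name "_yaml_file" "yaml" T hT (by decide) hm
      have c15 := pv_ew_ext_false name "_xml_file" "xml" T hT (by decide) hm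
      have c16 := pv_ew_ext_false name "_sif_file" "sif" T hT (by decide) hm
      have hcont : (PySem.Str.slice name none (some (-5))).toList.contains '_' = false := by
        rw [hstem2]
        simp [hm]
      rw [c1, c2, c3, c4, c5, c6, c7, c8, c9, c10, c11, c12, c13, c14, c15, c16]
      simp only [pvRPartUnderscore, hcont, Bool.false_and]
      simp
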